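-- pv_equiv track=rewrite | github.com/testing61589/sd-tag-canvas | scripts/convert_to_danbooru.py | _apply_solo_filtering
-- ===== SOURCE A (Python) =====
-- from typing import List, Dict, Set, Tuple, Optional, Union
--
-- def _apply_solo_filtering(tokens: List[str]) -> List[str]:
--     """Apply solo filtering for size-based tokens."""
--     if "solo" not in tokens:
--         return tokens
--
--     size_order = {"small": 1, "medium": 2, "big": 3, "large": 4, "huge": 5, "gigantic": 6}
--     size_groups = {}
--     non_size_tokens = []
--
--     for token in tokens:
--         parts = token.split(maxsplit=1)
--         if len(parts) == 2 and parts[0].lower() in size_order: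
--             size = parts[0].lower()
--             item = parts[1].strip()
--             rank = size_order[size]
--             if item not in size_groups or rank > size_groups[item][0]:
--                 size_groups[item] = (rank, token)
--         else:
--             non_size_tokens.append(token)
--
--     return sorted(non_size_tokens + [val[1] for val in size_groups.values()])
-- ===== SOURCE B (Python) =====
-- from typing import List, Optional, Tuple
--
-- _SIZE_ORDER = {"small": 1, "medium": 2, "big": 3, "large": 4, "huge": 5, "gigantic": 6}
--
--
-- def _parse_size(token: str) -> Optional[Tuple[str, int]]:
--     """(item, rank) if the token is '<size-word> <item>', else None."""
--     parts = token.split(maxsplit=1)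
--     if len(parts) == 2 and parts[0].lower() in _SIZE_ORDER:
--         return (parts[1].strip(), _SIZE_ORDER[parts[0].lower()])
--     return None
--
--
-- def _apply_solo_filtering(tokens: List[str]) -> List[str]:
--     """Apply solo filtering for size-based tokens."""
--     if "solo" not in tokens:
--         return tokens
--     non_size = []
--     sized = []
--     for token in tokens:
--         p = _parse_size(token)
--         if p is None:
--             non_size.append(token)
--         else:
--             sized.append((p[0], p[1], token))
--     items = list(dict.fromkeys(e[0] for e in sized))
--     chosen = [max((e for e in sized if e[0] == item), key=lambda e: e[1])[2]
--               for item in items]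
--     return sorted(non_size + chosen)
-- ===== Notes on version B (the rewrite author's own statement) =====
-- stated objective: idiomatic
-- what changed: A tracks a running best-(rank,token) dict updated in one pass; B partitions tokens once, takes the distinct items with dict.fromkeys, and picks each item's winner with max(..., key=rank) over that item's tokens, then sorts.
import Mathlib
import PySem

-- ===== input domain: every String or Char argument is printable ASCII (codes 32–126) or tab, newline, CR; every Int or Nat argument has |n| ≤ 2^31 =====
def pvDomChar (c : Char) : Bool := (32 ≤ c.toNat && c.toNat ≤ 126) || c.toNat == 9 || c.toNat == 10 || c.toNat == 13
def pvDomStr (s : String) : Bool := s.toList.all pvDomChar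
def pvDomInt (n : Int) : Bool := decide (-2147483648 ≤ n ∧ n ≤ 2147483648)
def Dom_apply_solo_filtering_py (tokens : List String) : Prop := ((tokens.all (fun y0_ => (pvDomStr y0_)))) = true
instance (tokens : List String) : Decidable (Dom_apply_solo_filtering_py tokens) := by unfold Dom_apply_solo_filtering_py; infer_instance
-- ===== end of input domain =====

-- B replaces A's running best-per-item dict by a partition, an ordered dedup of the
-- items, and a per-item max-by-rank selection (idiomatic decomposition, similar cost).

-- ===== PORT A =====
-- A's loop body, named (the fold over tokens applies it step by step)
def pvAStep (st : PySem.Dict String (Int × String) × List String) (token : String) :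
    PySem.Dict String (Int × String) × List String :=
  let size_order : PySem.Dict String Int :=
    PySem.Dict.ofList [("small", 1), ("medium", 2), ("big", 3), ("large", 4), ("huge", 5), ("gigantic", 6)]
  let parts := PySem.Str.split₀Max token 1
  if parts.length = 2 ∧ size_order.contains (PySem.Str.lower (PySem.List.pyGetD parts 0 "")) = true then
    let size := PySem.Str.lower (PySem.List.pyGetD parts 0 "")
    let item := PySem.Str.strip (PySem.List.pyGetD parts 1 "")
    let rank := size_order.getD size 0
    match st.1.get? item with
    | none => (st.1.insert item (rank, token), st.2)
    | some v => if rank > v.1 then (st.1.insert item (rank, token), st.2) else st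
  else (st.1, st.2 ++ [token])

def apply_solo_filtering_py (tokens : List String) : List String :=
  if "solo" ∈ tokens then
    let st := tokens.foldl pvAStep (PySem.Dict.empty, ([] : List String))
    PySem.List.sorted (st.2 ++ st.1.values.map (fun v => v.2)) (fun x => x) false
  else tokens

-- ===== PORT B =====
-- module-level _SIZE_ORDER of Source B
def pvSizeOrder : PySem.Dict String Int :=
  PySem.Dict.ofList [("small", 1), ("medium", 2), ("big", 3), ("large", 4), ("huge", 5), ("gigantic", 6)]

-- _parse_size of Source B
def pvParseSize (token : String) : Option (String × Int) :=
  let parts := PySem.Str.split₀Max token 1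
  if parts.length = 2 ∧ pvSizeOrder.contains (PySem.Str.lower (PySem.List.pyGetD parts 0 "")) = true then
    some (PySem.Str.strip (PySem.List.pyGetD parts 1 ""),
          pvSizeOrder.getD (PySem.Str.lower (PySem.List.pyGetD parts 0 "")) 0)
  else none

def apply_solo_filtering_py_alt (tokens : List String) : List String :=
  if "solo" ∈ tokens then
    let st := tokens.foldl
      (fun (st : List String × List (String × Int × String)) token =>
        match pvParseSize token with
        | none => (st.1 ++ [token], st.2)
        | some p => (st.1, st.2 ++ [(p.1, p.2, token)]))
      (([] : List String), ([] : List (String × Int × String)))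
    let non_size := st.1
    let sized := st.2
    let items := PySem.List.dedup (sized.map (fun e => e.1))
    -- max over an item's tokens; each item comes from sized, so the list is nonempty
    -- and Python's max never raises; the .getD default is unreachable
    let chosen := items.map (fun d =>
      ((PySem.List.max? (sized.filter (fun e => e.1 == d)) (fun e => e.2.1)).getD ("", 0, "")).2.2)
    PySem.List.sorted (non_size ++ chosen) (fun x => x) false
  else tokens

-- ===== PRECONDITION & SPEC =====
def Spec_apply_solo_filtering_py (tokens : List String) (out : List String) : Prop := out = apply_solo_filtering_py_alt tokens
instance (tokens : List String) (out : List String) : Decidable (Spec_apply_solo_filtering_py tokens out) := by unfold Spec_apply_solo_filtering_py; infer_instance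

-- ===== CLAIM (what is proved, stated in full; the proofs are below) =====
def Claim_equal_apply_solo_filtering_py : Prop := ∀ (tokens : List String), Dom_apply_solo_filtering_py tokens → Spec_apply_solo_filtering_py tokens (apply_solo_filtering_py tokens)

-- ===== LEMMAS AND PROOFS =====

-- A's step expressed through B's parser
theorem pvAStep_eq (st : PySem.Dict String (Int × String) × List String) (token : String) :
    pvAStep st token =
      match pvParseSize token with
      | none => (st.1, st.2 ++ [token])
      | some p =>
        match st.1.get? p.1 with
        | none => (st.1.insert p.1 (p.2, token), st.2)
        | some v => if p.2 > v.1 then (st.1.insert p.1 (p.2, token), st.2) else st := by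
  unfold pvAStep pvParseSize pvSizeOrder
  by_cases h : (PySem.Str.split₀Max token 1).length = 2 ∧
      (PySem.Dict.ofList [("small", (1:Int)), ("medium", 2), ("big", 3), ("large", 4), ("huge", 5), ("gigantic", 6)]).contains (PySem.Str.lower (PySem.List.pyGetD (PySem.Str.split₀Max token 1) 0 "")) = true
  · rw [if_pos h, if_pos h]
  · rw [if_neg h, if_neg h]

-- the non-size tokens of a list, in order
def pvNs (l : List String) : List String := l.filter (fun t => (pvParseSize t).isNone)

-- the (item, rank, token) triples of the size tokens, in order
def pvSized (l : List String) : List (String × Int × String) :=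
  l.filterMap (fun t => (pvParseSize t).map (fun p => (p.1, p.2, t)))

-- the distinct items, in first-occurrence order
def pvItems (l : List String) : List String :=
  PySem.List.dedup (l.filterMap (fun t => (pvParseSize t).map (fun p => p.1)))

-- best (rank, token) for one item over a prefix (first among maximal ranks)
def pvBestStep (item : String) (acc : Option (Int × String)) (t : String) : Option (Int × String) :=
  match pvParseSize t with
  | some p =>
    if p.1 = item then
      match acc with
      | none => some (p.2, t)
      | some v => if p.2 > v.1 then some (p.2, t) else acc
    else acc
  | none => acc

def pvBestOf (l : List String) (item : String) : Option (Int × String) :=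
  l.foldl (pvBestStep item) none

theorem pvBestOf_snoc (l : List String) (t : String) (item : String) :
    pvBestOf (l ++ [t]) item = pvBestStep item (pvBestOf l item) t := by
  simp [pvBestOf, List.foldl_append]

theorem pvItems_snoc_none {t : String} (h : pvParseSize t = none) (pre : List String) :
    pvItems (pre ++ [t]) = pvItems pre := by
  simp [pvItems, List.filterMap_append, h]

theorem pvItems_snoc_some {t : String} {p : String × Int} (h : pvParseSize t = some p)
    (pre : List String) :
    pvItems (pre ++ [t]) = if p.1 ∈ pvItems pre then pvItems pre else pvItems pre ++ [p.1] := by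
  simp only [pvItems, List.filterMap_append, List.filterMap_cons, h, Option.map_some,
    List.filterMap_nil]
  rw [PySem.List.dedup_eq_ofList, PySem.List.dedup_eq_ofList, PySem.Set.ofList_eq_foldl,
    PySem.Set.ofList_eq_foldl, List.foldl_append]
  simp only [List.foldl_cons, List.foldl_nil, PySem.Set.add]
  by_cases hm : p.1 ∈ (pre.filterMap (fun t => (pvParseSize t).map (fun p => p.1))).foldl PySem.Set.add []
  · rw [if_pos ((PySem.Set.contains_iff _ _).mpr hm), if_pos hm]
  · rw [if_neg (by simp [hm]), if_neg hm]

-- B's partition loop, characterised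
theorem pvPartition (l : List String) (a : List String) (b : List (String × Int × String)) :
    l.foldl
      (fun (st : List String × List (String × Int × String)) token =>
        match pvParseSize token with
        | none => (st.1 ++ [token], st.2)
        | some p => (st.1, st.2 ++ [(p.1, p.2, token)]))
      (a, b) = (a ++ pvNs l, b ++ pvSized l) := by
  induction l generalizing a b with
  | nil => simp [pvNs, pvSized]
  | cons t rest ih =>
    cases hp : pvParseSize t with
    | none => simp [List.foldl_cons, hp, ih, pvNs, pvSized]
    | some p => simp [List.foldl_cons, hp, ih, pvNs, pvSized]

-- Python's max(..., key=rank) over one item's triples IS the first-maximum fold pvBestOf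
theorem pvMax2 (a b : String × Int × String) (xs : List (String × Int × String)) :
    PySem.List.max? (a :: b :: xs) (fun e => e.2.1)
      = PySem.List.max? ((if a.2.1 < b.2.1 then b else a) :: xs) (fun e => e.2.1) := by
  by_cases h : a.2.1 < b.2.1 <;> simp [PySem.List.max?, List.foldl_cons, h]

theorem pvMaxAux (l : List String) (d : String) (acc : Option (Int × String)) :
    PySem.List.max? ((acc.map (fun v => (d, v))).toList ++ (pvSized l).filter (fun e => e.1 == d))
      (fun e => e.2.1)
    = (l.foldl (pvBestStep d) acc).map (fun v => (d, v)) := by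
  induction l generalizing acc with
  | nil =>
    cases acc with
    | none => simp [pvSized, PySem.List.max?]
    | some v => simp [pvSized, PySem.List.max?]
  | cons t rest ih =>
    rw [List.foldl_cons]
    cases hp : pvParseSize t with
    | none =>
      have hsz : pvSized (t :: rest) = pvSized rest := by
        simp [pvSized, hp]
      have hstep : pvBestStep d acc t = acc := by simp [pvBestStep, hp]
      rw [hsz, hstep]; exact ih acc
    | some p =>
      by_cases hd : p.1 = d
      · have hsz : (pvSized (t :: rest)).filter (fun e => e.1 == d)
            = (p.1, p.2, t) :: (pvSized rest).filter (fun e => e.1 == d) := by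
          simp [pvSized, hp, hd]
        rw [hsz]
        cases acc with
        | none =>
          have hstep : pvBestStep d none t = some (p.2, t) := by simp [pvBestStep, hp, hd]
          rw [hstep]
          have := ih (some (p.2, t))
          simpa [hd] using this
        | some v =>
          have hstep : pvBestStep d (some v) t = some (if p.2 > v.1 then (p.2, t) else v) := by
            by_cases hr : p.2 > v.1 <;> simp [pvBestStep, hp, hd, hr]
          rw [hstep]
          simp only [Option.map_some, Option.toList_some, List.singleton_append]
          rw [pvMax2]
          have hhead : (if ((d, v.1, v.2) : String × Int × String).2.1 < ((p.1, p.2, t) : String × Int × String).2.1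
                then ((p.1, p.2, t) : String × Int × String) else (d, v.1, v.2))
              = (d, if p.2 > v.1 then (p.2, t) else v) := by
            by_cases hr : v.1 < p.2 <;> simp [hd, hr, gt_iff_lt]
          rw [hhead]
          have := ih (some (if p.2 > v.1 then (p.2, t) else v))
          simpa using this
      · have hsz : (pvSized (t :: rest)).filter (fun e => e.1 == d)
            = (pvSized rest).filter (fun e => e.1 == d) := by
          simp [pvSized, hp, hd]
        have hstep : pvBestStep d acc t = acc := by simp [pvBestStep, hp, hd]
        rw [hsz, hstep]; exact ih acc

theorem pvMax_eq_best (l : List String) (d : String) :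
    PySem.List.max? ((pvSized l).filter (fun e => e.1 == d)) (fun e => e.2.1)
      = (pvBestOf l d).map (fun v => (d, v)) := by
  have := pvMaxAux l d none
  simpa [pvBestOf] using this

-- the MAIN invariant for A's fold: the dict's keys are the distinct items of the prefix
-- and each key maps to the prefix's first-maximum (rank, token)
theorem pvMainA (after : List String) (g : PySem.Dict String (Int × String))
    (ns pre : List String)
    (hnd : g.keys.Nodup) (hkeys : g.keys = pvItems pre)
    (hget : ∀ d, g.get? d = pvBestOf pre d) :
    (after.foldl pvAStep (g, ns)).2 = ns ++ pvNs after ∧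
    (after.foldl pvAStep (g, ns)).1.keys.Nodup ∧
    (after.foldl pvAStep (g, ns)).1.keys = pvItems (pre ++ after) ∧
    (∀ d, (after.foldl pvAStep (g, ns)).1.get? d = pvBestOf (pre ++ after) d) := by
  induction after generalizing g ns pre with
  | nil =>
    refine ⟨by simp [pvNs], hnd, by simpa using hkeys, by intro d; simpa using hget d⟩
  | cons t rest ih =>
    rw [List.foldl_cons]
    have hassoc : pre ++ t :: rest = (pre ++ [t]) ++ rest := by simp
    cases hp : pvParseSize t with
    | none =>
      have hstep : pvAStep (g, ns) t = (g, ns ++ [t]) := by rw [pvAStep_eq, hp]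
      have hkeys' : g.keys = pvItems (pre ++ [t]) := by rw [pvItems_snoc_none hp]; exact hkeys
      have hget' : ∀ d, g.get? d = pvBestOf (pre ++ [t]) d := by
        intro d; rw [pvBestOf_snoc]; simp [pvBestStep, hp, hget d]
      have h := ih g (ns ++ [t]) (pre ++ [t]) hnd hkeys' hget'
      rw [hstep, hassoc]
      refine ⟨?_, h.2⟩
      rw [h.1]; simp [pvNs, hp]
    | some p =>
      cases hb : g.get? p.1 with
      | none =>
        have hmem : p.1 ∉ pvItems pre := by
          rw [← hkeys]; exact (PySem.Dict.get?_eq_none_iff_not_mem_keys g p.1).mp hb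
        have hcont : g.contains p.1 = false := by
          rw [PySem.Dict.contains_eq_isSome_get?, hb]; rfl
        have hstep : pvAStep (g, ns) t = (g.insert p.1 (p.2, t), ns) := by
          rw [pvAStep_eq, hp]; simp [hb]
        have hnd' : (g.insert p.1 (p.2, t)).keys.Nodup := PySem.Dict.nodup_keys_insert g _ _ hnd
        have hkeys' : (g.insert p.1 (p.2, t)).keys = pvItems (pre ++ [t]) := by
          rw [PySem.Dict.keys_insert_of_not_contains g _ hcont, pvItems_snoc_some hp,
            if_neg hmem, hkeys]
        have hget' : ∀ d, (g.insert p.1 (p.2, t)).get? d = pvBestOf (pre ++ [t]) d := by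
          intro d
          rw [pvBestOf_snoc, PySem.Dict.get?_insert]
          by_cases hd : d = p.1
          · subst hd
            rw [if_pos rfl]
            have hbb : pvBestOf pre p.1 = none := by rw [← hget p.1]; exact hb
            simp [pvBestStep, hp, hbb]
          · rw [if_neg hd, hget d]
            have hne : ¬ p.1 = d := fun h => hd h.symm
            simp [pvBestStep, hp, hne]
        have h := ih (g.insert p.1 (p.2, t)) ns (pre ++ [t]) hnd' hkeys' hget'
        rw [hstep, hassoc]
        refine ⟨?_, h.2⟩
        rw [h.1]; simp [pvNs, hp]
      | some v =>
        have hmem : p.1 ∈ pvItems pre := by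
          rw [← hkeys]
          by_contra hx
          rw [(PySem.Dict.get?_eq_none_iff_not_mem_keys g p.1).mpr hx] at hb
          simp at hb
        have hitemsT : pvItems (pre ++ [t]) = pvItems pre := by
          rw [pvItems_snoc_some hp, if_pos hmem]
        by_cases hr : p.2 > v.1
        · have hcont : g.contains p.1 = true := by
            rw [PySem.Dict.contains_eq_isSome_get?, hb]; rfl
          have hstep : pvAStep (g, ns) t = (g.insert p.1 (p.2, t), ns) := by
            rw [pvAStep_eq, hp]; simp [hb, hr]
          have hnd' : (g.insert p.1 (p.2, t)).keys.Nodup := PySem.Dict.nodup_keys_insert g _ _ hnd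
          have hkeys' : (g.insert p.1 (p.2, t)).keys = pvItems (pre ++ [t]) := by
            rw [PySem.Dict.keys_insert_of_contains g _ hcont, hitemsT, hkeys]
          have hget' : ∀ d, (g.insert p.1 (p.2, t)).get? d = pvBestOf (pre ++ [t]) d := by
            intro d
            rw [pvBestOf_snoc, PySem.Dict.get?_insert]
            by_cases hd : d = p.1
            · subst hd
              rw [if_pos rfl]
              have hbb : pvBestOf pre p.1 = some v := by rw [← hget p.1]; exact hb
              simp [pvBestStep, hp, hbb, hr]
            · rw [if_neg hd, hget d]
              have hne : ¬ p.1 = d := fun h => hd h.symm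
              simp [pvBestStep, hp, hne]
          have h := ih (g.insert p.1 (p.2, t)) ns (pre ++ [t]) hnd' hkeys' hget'
          rw [hstep, hassoc]
          refine ⟨?_, h.2⟩
          rw [h.1]; simp [pvNs, hp]
        · have hstep : pvAStep (g, ns) t = (g, ns) := by
            rw [pvAStep_eq, hp]; simp [hb, hr]
          have hkeys' : g.keys = pvItems (pre ++ [t]) := by rw [hitemsT]; exact hkeys
          have hget' : ∀ d, g.get? d = pvBestOf (pre ++ [t]) d := by
            intro d
            rw [pvBestOf_snoc]
            by_cases hd : d = p.1
            · subst hd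
              have hbb : pvBestOf pre p.1 = some v := by rw [← hget p.1]; exact hb
              simp [pvBestStep, hp, hbb, hr, hget p.1]
            · rw [hget d]
              have hne : ¬ p.1 = d := fun h => hd h.symm
              simp [pvBestStep, hp, hne]
          have h := ih g ns (pre ++ [t]) hnd hkeys' hget'
          rw [hstep, hassoc]
          refine ⟨?_, h.2⟩
          rw [h.1]; simp [pvNs, hp]

-- extracting the chosen token from an optional best, both ways
theorem pvExtract (d : String) (o : Option (Int × String)) :
    (((o.map (fun v => (d, v))).getD ("", 0, "")).2.2 : String) = (o.getD (0, "")).2 := by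
  cases o <;> rfl

-- ===== VERDICT (by name: the statement is the Claim_ definition above) =====
theorem apply_solo_filtering_py_spec : Claim_equal_apply_solo_filtering_py := by
  intro tokens _
  unfold Spec_apply_solo_filtering_py apply_solo_filtering_py apply_solo_filtering_py_alt
  by_cases hs : "solo" ∈ tokens
  · simp only [hs, if_pos]
    have hA := pvMainA tokens PySem.Dict.empty [] [] (by simp)
      (by simp [PySem.Dict.keys_empty, pvItems]) (by intro d; simp [PySem.Dict.get?_empty, pvBestOf])
    obtain ⟨hns, hnd, hkeys, hget⟩ := hA
    rw [pvPartition tokens [] []]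
    simp only [List.nil_append]
    congr 1
    rw [hns]
    simp only [List.nil_append]
    congr 1
    -- A's dict values tokens = B's chosen tokens, in the same order
    have hvals : (tokens.foldl pvAStep (PySem.Dict.empty, [])).1.values
        = (tokens.foldl pvAStep (PySem.Dict.empty, [])).1.keys.map
            (fun k => (tokens.foldl pvAStep (PySem.Dict.empty, [])).1.getD k ((0 : Int), "")) :=
      PySem.Dict.values_eq_map_keys _ hnd _
    rw [hvals, hkeys, List.map_map]
    have hitems : PySem.List.dedup ((pvSized tokens).map (fun e => e.1)) = pvItems tokens := by
      unfold pvSized pvItems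
      congr 1
      rw [List.map_filterMap]
      congr 1
      funext t
      cases hp : pvParseSize t <;> simp
    rw [hitems]
    apply List.map_congr_left
    intro d _
    simp only [Function.comp_apply]
    rw [pvMax_eq_best, pvExtract, PySem.Dict.getD_eq_get?_getD, hget d]
    simp
  · simp [hs]
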